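-- pv_equiv track=rewrite | github.com/Evgya/Python | Yandex_training_1.0/5/I. Robot/Robot.py | get_efficient_uses
-- ===== SOURCE A (Python) =====
-- def get_efficient_uses(K, operations):
--     previous_len = efficient_uses = 0
--     for i in range(K, len(operations)):
--         if operations[i] == operations[i - K]:
--             previous_len += 1
--             efficient_uses += previous_len
--         else:
--             previous_len = 0
--     return efficient_uses
-- ===== SOURCE B (Python) =====
-- def get_efficient_uses(K, operations):
--     # Divide and conquer: build the match sequence once, then count the
--     # nonempty all-True subintervals (which is exactly A's answer) by
--     # recursively splitting the sequence in halves and combining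
--     # (count, prefix-run, suffix-run) triples: intervals crossing the cut
--     # are suffix_run(left) * prefix_run(right).
--     n = len(operations)
--     matches = [operations[i] == operations[i - K] for i in range(K, n)]
--
--     def solve(lo, hi):
--         if hi - lo == 0:
--             return (0, 0, 0)
--         if hi - lo == 1:
--             return (1, 1, 1) if matches[lo] else (0, 0, 0)
--         mid = (lo + hi) // 2
--         c1, p1, s1 = solve(lo, mid)
--         c2, p2, s2 = solve(mid, hi)
--         pref = p1 + p2 if p1 == mid - lo else p1
--         suf = s2 + s1 if s2 == hi - mid else s2
--         return (c1 + c2 + s1 * p2, pref, suf)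
--
--     return solve(0, len(matches))[0]
-- ===== Notes on version B (the rewrite author's own statement) =====
-- stated objective: alternative
-- what changed: Replaces A's linear run-length accumulator with a divide-and-conquer count of all-True subintervals of the precomputed match sequence, combining (count, prefix-run, suffix-run) triples of the two halves with count = cL + cR + suf(L)*pref(R).
import Mathlib
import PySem

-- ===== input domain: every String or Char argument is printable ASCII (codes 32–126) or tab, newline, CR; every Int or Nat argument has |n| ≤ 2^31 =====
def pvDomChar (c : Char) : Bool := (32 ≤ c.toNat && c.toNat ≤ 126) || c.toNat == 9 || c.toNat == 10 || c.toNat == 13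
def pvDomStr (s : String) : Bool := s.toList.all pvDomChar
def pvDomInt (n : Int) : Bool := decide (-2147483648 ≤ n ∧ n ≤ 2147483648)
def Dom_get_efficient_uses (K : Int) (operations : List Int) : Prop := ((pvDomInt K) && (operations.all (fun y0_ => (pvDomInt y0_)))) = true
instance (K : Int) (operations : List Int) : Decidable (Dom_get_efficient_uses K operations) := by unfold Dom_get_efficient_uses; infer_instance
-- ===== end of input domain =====

-- B replaces A's linear run-length accumulator by a divide-and-conquer count of the
-- all-True subintervals of the precomputed match sequence (alternative algorithm).

-- ===== PORT A =====
def get_efficient_uses (K : Int) (operations : List Int) : Int :=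
  ((PySem.List.pyRange K (operations.length : Int) 1).foldl
    (fun (st : Int × Int) i =>
      if PySem.List.pyGetD operations i 0 = PySem.List.pyGetD operations (i - K) 0
      then (st.1 + 1, st.2 + (st.1 + 1))
      else (0, st.2))
    (0, 0)).2

-- ===== PORT B =====
-- Source B's inner 'solve(lo, hi)' on the matches list; the final 'else' branch is a
-- totality guard for hi < lo (unreachable from get_efficient_uses_alt's call).
def pvSolve (ms : List Bool) (lo hi : Int) : Int × Int × Int :=
  if hi - lo = 0 then (0, 0, 0)
  else if hi - lo = 1 then
    (if PySem.List.pyGetD ms lo false then (1, 1, 1) else (0, 0, 0))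
  else if h2 : 0 < hi - lo then
    let mid := PySem.Int.floordiv (lo + hi) 2
    let l := pvSolve ms lo mid
    let r := pvSolve ms mid hi
    let pref := if l.2.1 = mid - lo then l.2.1 + r.2.1 else l.2.1
    let suf := if r.2.2 = hi - mid then r.2.2 + l.2.2 else r.2.2
    (l.1 + r.1 + l.2.2 * r.2.1, pref, suf)
  else (0, 0, 0)
termination_by (hi - lo).toNat
decreasing_by
  · have : PySem.Int.floordiv (lo + hi) 2 = (lo + hi) / 2 :=
      PySem.Int.floordiv_eq_ediv_of_pos (by norm_num)
    rw [this]; omega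
  · have : PySem.Int.floordiv (lo + hi) 2 = (lo + hi) / 2 :=
      PySem.Int.floordiv_eq_ediv_of_pos (by norm_num)
    rw [this]; omega

def get_efficient_uses_alt (K : Int) (operations : List Int) : Int :=
  let n : Int := (operations.length : Int)
  let ms := (PySem.List.pyRange K n 1).map
    (fun i => decide (PySem.List.pyGetD operations i 0 = PySem.List.pyGetD operations (i - K) 0))
  (pvSolve ms 0 (ms.length : Int)).1

-- ===== PRECONDITION & SPEC =====
-- Pre_ excludes exactly K < 0, where the Python A raises IndexError (operations[i-K]
-- eventually indexes past the end; on empty input operations[K] already raises).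
def Pre_get_efficient_uses (K : Int) (operations : List Int) : Prop := 0 ≤ K
instance (K : Int) (operations : List Int) : Decidable (Pre_get_efficient_uses K operations) := by unfold Pre_get_efficient_uses; infer_instance
def pvWitness_get_efficient_uses : Int × List Int := (2, [1, 2, 1, 2, 1, 3])

def Spec_get_efficient_uses (K : Int) (operations : List Int) (out : Int) : Prop := out = get_efficient_uses_alt K operations
instance (K : Int) (operations : List Int) (out : Int) : Decidable (Spec_get_efficient_uses K operations out) := by unfold Spec_get_efficient_uses; infer_instance

-- ===== CLAIM (what is proved, stated in full; the proofs are below) =====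
def Claim_equal_get_efficient_uses : Prop := ∀ (K : Int) (operations : List Int), Dom_get_efficient_uses K operations → Pre_get_efficient_uses K operations → Spec_get_efficient_uses K operations (get_efficient_uses K operations)

-- ===== LEMMAS AND PROOFS =====

-- prefix run, suffix run, and interval count of a boolean sequence
def pvTw (bs : List Bool) : Int := ((bs.takeWhile id).length : Int)
def pvSuf (bs : List Bool) : Int := pvTw bs.reverse
def pvS : List Bool → Int
  | [] => 0
  | b :: bs => pvTw (b :: bs) + pvS bs

lemma pvTw_eq_length_iff (bs : List Bool) :
    pvTw bs = (bs.length : Int) ↔ ∀ x ∈ bs, x = true := by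
  unfold pvTw
  constructor
  · intro h
    have hpref := (List.takeWhile_prefix (l := bs) id).eq_of_length (by exact_mod_cast h)
    intro x hx
    simpa using List.takeWhile_eq_self_iff.mp hpref x hx
  · intro h
    rw [List.takeWhile_eq_self_iff.mpr (by intro x hx; simpa using h x hx)]

lemma pvSuf_eq_length_iff (bs : List Bool) :
    pvSuf bs = (bs.length : Int) ↔ ∀ x ∈ bs, x = true := by
  unfold pvSuf
  rw [show (bs.length : Int) = (bs.reverse.length : Int) by simp,
      pvTw_eq_length_iff]
  simp

lemma pvTw_append (L R : List Bool) :
    pvTw (L ++ R) = if pvTw L = (L.length : Int) then (L.length : Int) + pvTw R else pvTw L := by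
  unfold pvTw
  rw [List.takeWhile_append]
  split_ifs with h1 h2 h2
  · simp
  · exact absurd (by exact_mod_cast h1) h2
  · exact absurd (by exact_mod_cast h2) h1
  · rfl

lemma pvSuf_append (L R : List Bool) :
    pvSuf (L ++ R) = if pvSuf R = (R.length : Int) then pvSuf R + pvSuf L else pvSuf R := by
  unfold pvSuf
  rw [List.reverse_append, pvTw_append]
  simp only [List.length_reverse]
  split_ifs with h
  · rw [h]
  · rfl

lemma pvTw_cons (b : Bool) (bs : List Bool) :
    pvTw (b :: bs) = if b then 1 + pvTw bs else 0 := by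
  cases b <;> simp [pvTw, List.takeWhile_cons] <;> ring

lemma pvSuf_cons (b : Bool) (bs : List Bool) :
    pvSuf (b :: bs) =
      if pvSuf bs = (bs.length : Int) then pvSuf bs + (if b then 1 else 0) else pvSuf bs := by
  have h := pvSuf_append [b] bs
  simp only [List.singleton_append] at h
  rw [h]
  have hb : pvSuf [b] = if b then 1 else 0 := by cases b <;> rfl
  rw [hb]

lemma pvS_append (L R : List Bool) :
    pvS (L ++ R) = pvS L + pvS R + pvSuf L * pvTw R := by
  induction L with
  | nil => simp [pvS, pvSuf, pvTw]
  | cons b L ih =>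
    have hsuf := pvSuf_cons b L
    have hLR := pvTw_append L R
    show pvTw (b :: (L ++ R)) + pvS (L ++ R) = (pvTw (b :: L) + pvS L) + pvS R + pvSuf (b :: L) * pvTw R
    rw [ih, pvTw_cons, pvTw_cons, hsuf, hLR]
    by_cases hall : pvTw L = (L.length : Int)
    · have hsame : pvSuf L = (L.length : Int) :=
        (pvSuf_eq_length_iff L).2 ((pvTw_eq_length_iff L).1 hall)
      cases b <;> simp [hall, hsame] <;> ring
    · have hsufne : ¬ pvSuf L = (L.length : Int) := fun h =>
        hall ((pvTw_eq_length_iff L).2 ((pvSuf_eq_length_iff L).1 h))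
      cases b <;> simp [hall, hsufne] <;> ring

-- A's loop over the boolean sequence
def pvStepA (st : Int × Int) (b : Bool) : Int × Int :=
  if b then (st.1 + 1, st.2 + (st.1 + 1)) else (0, st.2)

lemma pvAfold : ∀ (bs : List Bool) (p t : Int),
    (bs.foldl pvStepA (p, t)).2 = t + pvS bs + p * pvTw bs := by
  intro bs
  induction bs with
  | nil => intro p t; simp [pvS, pvTw]
  | cons b bs ih =>
    intro p t
    cases b with
    | true =>
      show (bs.foldl pvStepA (p + 1, t + (p + 1))).2 = _
      rw [ih, pvS, pvTw_cons]
      simp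
      ring
    | false =>
      show (bs.foldl pvStepA (0, t)).2 = _
      rw [ih, pvS, pvTw_cons]
      simp

-- the common list of per-position comparison outcomes
def pvBools (K : Int) (ops : List Int) : List Bool :=
  (List.range ((ops.length : Int) - K).toNat).map
    (fun k => decide (ops.getD (K.toNat + k) 0 = ops.getD k 0))

lemma pvA_eq (K : Int) (ops : List Int) (hK : 0 ≤ K) :
    get_efficient_uses K ops = ((pvBools K ops).foldl pvStepA (0, 0)).2 := by
  unfold get_efficient_uses pvBools
  rw [PySem.List.pyRange_one, List.foldl_map, List.foldl_map]
  congr 2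
  funext st k
  have hc2 : K + (k : Int) - K = ((k : Nat) : Int) := by ring
  have hc1 : K + (k : Int) = ((K.toNat + k : Nat) : Int) := by push_cast; omega
  rw [hc2, PySem.List.pyGetD_natCast, hc1, PySem.List.pyGetD_natCast]
  simp [pvStepA]

lemma pvMs_eq (K : Int) (ops : List Int) (hK : 0 ≤ K) :
    (PySem.List.pyRange K (ops.length : Int) 1).map
      (fun i => decide (PySem.List.pyGetD ops i 0 = PySem.List.pyGetD ops (i - K) 0))
      = pvBools K ops := by
  unfold pvBools
  rw [PySem.List.pyRange_one, List.map_map]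
  congr 1
  funext k
  simp only [Function.comp_apply]
  have hc2 : K + (k : Int) - K = ((k : Nat) : Int) := by ring
  have hc1 : K + (k : Int) = ((K.toNat + k : Nat) : Int) := by push_cast; omega
  rw [hc2, PySem.List.pyGetD_natCast, hc1, PySem.List.pyGetD_natCast]

-- pvSolve computes (count, prefix-run, suffix-run) of the segment [lo, hi) of ms
lemma pvSolve_eq (ms : List Bool) :
    ∀ (d : Nat) (lo hi : Int), (hi - lo).toNat = d → 0 ≤ lo → lo ≤ hi → hi ≤ (ms.length : Int) →
      pvSolve ms lo hi =
        (pvS ((ms.drop lo.toNat).take (hi - lo).toNat),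
         pvTw ((ms.drop lo.toNat).take (hi - lo).toNat),
         pvSuf ((ms.drop lo.toNat).take (hi - lo).toNat)) := by
  intro d
  induction d using Nat.strong_induction_on with
  | _ d ih =>
    intro lo hi hd hlo hlh hhi
    rw [pvSolve]
    by_cases h0 : hi - lo = 0
    · simp [h0, pvS, pvTw, pvSuf]
    by_cases h1 : hi - lo = 1
    · obtain ⟨m, rfl⟩ : ∃ m : Nat, lo = (m : Int) := ⟨lo.toNat, by omega⟩
      have hlt : m < ms.length := by omega
      have hseg : (ms.drop ((m : Int)).toNat).take (hi - m).toNat = [ms.getD m false] := by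
        rw [h1, Int.toNat_natCast, List.drop_eq_getElem_cons hlt,
            List.getD_eq_getElem?_getD, List.getElem?_eq_getElem hlt]
        rfl
      rw [hseg]
      simp only [h0, h1, if_false, if_true, PySem.List.pyGetD_natCast]
      cases hb : ms.getD m false <;> simp [hb, pvS, pvTw, pvSuf]
    · have h2 : 0 < hi - lo := by omega
      simp only [h0, h1, if_false, dif_pos h2]
      rw [PySem.Int.floordiv_eq_ediv_of_pos (by norm_num : (0:Int) < 2)]
      have hmlo : lo < (lo + hi) / 2 := by omega
      have hmhi : (lo + hi) / 2 < hi := by omega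
      set mid := (lo + hi) / 2 with hmid
      have hmge : 0 ≤ mid := by omega
      have hl := ih (mid - lo).toNat (by omega) lo mid rfl hlo (by omega) (by omega)
      have hr := ih (hi - mid).toNat (by omega) mid hi rfl (by omega) (by omega) hhi
      set L := (ms.drop lo.toNat).take (mid - lo).toNat with hLdef
      set R := (ms.drop mid.toNat).take (hi - mid).toNat with hRdef
      have hsplit : (ms.drop lo.toNat).take (hi - lo).toNat = L ++ R := by
        rw [hLdef, hRdef,
            show (hi - lo).toNat = (mid - lo).toNat + (hi - mid).toNat by omega,
            List.take_add, List.drop_drop,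
            show lo.toNat + (mid - lo).toNat = mid.toNat by omega]
      have hlenL : ((L.length : Nat) : Int) = mid - lo := by
        rw [hLdef]
        have hle : (mid - lo).toNat ≤ ms.length - lo.toNat := by omega
        simp only [List.length_take, List.length_drop, min_eq_left hle]
        omega
      have hlenR : ((R.length : Nat) : Int) = hi - mid := by
        rw [hRdef]
        have hle : (hi - mid).toNat ≤ ms.length - mid.toNat := by omega
        simp only [List.length_take, List.length_drop, min_eq_left hle]
        omega
      simp only [hl, hr]
      rw [hsplit, pvS_append, pvTw_append, pvSuf_append, hlenL, hlenR]
      simp only [Prod.mk.injEq]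
      refine ⟨trivial, ?_, trivial⟩
      split_ifs with h
      · rw [h]
      · rfl

lemma pvB_eq (K : Int) (ops : List Int) (hK : 0 ≤ K) :
    get_efficient_uses_alt K ops = pvS (pvBools K ops) := by
  simp only [get_efficient_uses_alt]
  rw [pvMs_eq K ops hK]
  set bs := pvBools K ops
  rw [pvSolve_eq bs bs.length 0 (bs.length : Int) (by omega) le_rfl (by positivity)
        le_rfl]
  simp

-- ===== VERDICT (by name: the statement is the Claim_ definition above) =====
theorem get_efficient_uses_spec : Claim_equal_get_efficient_uses := by
  intro K ops _ hpre
  unfold Spec_get_efficient_uses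
  rw [pvA_eq K ops hpre, pvB_eq K ops hpre, pvAfold]
  ring
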